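-- pv_equiv track=rewrite | github.com/sai2yeshwanth/Daily_Coding | Swap_Competiton.py | swap_competition
-- ===== SOURCE A (Python) =====
-- def swap_competition(list_a):
--     result = []
--     for item in range(len(list_a)):
--         words = list_a[item]
--         first_word = words[0].lower()
--         second_word = words[1].lower()
--         first_word = list(first_word)
--         second_word =list(second_word)
--         first_word = sorted(first_word)
--         second_word = sorted(second_word)
--         if first_word == second_word:
--             result.append("YES")
--         else:
--             result.append("NO")
--     return result
-- ===== SOURCE B (Python) =====
-- def _anagram(a, b):
--     a, b = list(a), list(b)
--     return all(a.count(c) == b.count(c) for c in a + b)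
--
--
-- def swap_competition(list_a):
--     return ["YES" if _anagram(p[0].lower(), p[1].lower()) else "NO" for p in list_a]
-- ===== Notes on version B (the rewrite author's own statement) =====
-- stated objective: alternative
-- what changed: Per pair, instead of building and sorting both lowercased character lists and comparing them, B checks anagram-hood by character-frequency equality (every character of either word occurs equally often in both), emitted via a list comprehension instead of an index loop with appends.
import Mathlib
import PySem

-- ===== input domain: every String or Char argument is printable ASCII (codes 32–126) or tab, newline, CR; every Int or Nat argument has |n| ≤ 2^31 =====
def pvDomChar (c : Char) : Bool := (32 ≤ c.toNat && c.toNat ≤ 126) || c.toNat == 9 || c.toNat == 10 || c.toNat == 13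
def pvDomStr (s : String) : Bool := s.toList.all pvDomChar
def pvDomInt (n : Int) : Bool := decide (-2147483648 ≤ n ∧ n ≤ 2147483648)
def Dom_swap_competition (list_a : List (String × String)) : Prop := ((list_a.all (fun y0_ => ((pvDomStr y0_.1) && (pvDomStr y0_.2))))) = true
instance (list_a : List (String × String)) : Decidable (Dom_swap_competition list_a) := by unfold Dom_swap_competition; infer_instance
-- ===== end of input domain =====

-- B replaces sort-and-compare per pair with a character-frequency equality check (alternative decomposition, similar cost).


-- ===== PORT A =====
def swap_competition (list_a : List (String × String)) : List String :=
  (PySem.List.pyRange 0 (PySem.List.len list_a) 1).foldl (fun result item =>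
    let words := PySem.List.pyGetD list_a item ("", "")   -- index always in range here
    let first_word := PySem.Str.lower words.1
    let second_word := PySem.Str.lower words.2
    let first_word := first_word.toList
    let second_word := second_word.toList
    let first_word := PySem.List.sorted first_word (fun x => x) false
    let second_word := PySem.List.sorted second_word (fun x => x) false
    if first_word == second_word then result ++ ["YES"] else result ++ ["NO"]) []

-- ===== PORT B =====
def pvAnagram (a b : String) : Bool :=
  let a := a.toList
  let b := b.toList
  (a ++ b).all (fun c => a.count c == b.count c)

def swap_competition_alt (list_a : List (String × String)) : List String :=
  list_a.map (fun p =>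
    if pvAnagram (PySem.Str.lower p.1) (PySem.Str.lower p.2) then "YES" else "NO")

-- ===== PRECONDITION & SPEC =====
def Spec_swap_competition (list_a : List (String × String)) (out : List String) : Prop := out = swap_competition_alt list_a
instance (list_a : List (String × String)) (out : List String) : Decidable (Spec_swap_competition list_a out) := by unfold Spec_swap_competition; infer_instance

-- ===== CLAIM (what is proved, stated in full; the proofs are below) =====
def Claim_equal_swap_competition : Prop := ∀ (list_a : List (String × String)), Dom_swap_competition list_a → Spec_swap_competition list_a (swap_competition list_a)

-- ===== LEMMAS AND PROOFS =====

-- frequency equality over the combined characters ↔ permutation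
theorem pvAnagram_iff_perm (a b : String) :
    pvAnagram a b = true ↔ a.toList.Perm b.toList := by
  unfold pvAnagram
  simp only [List.all_eq_true, List.mem_append, beq_iff_eq]
  constructor
  · intro h
    rw [List.perm_iff_count]
    intro c
    by_cases hc : c ∈ a.toList ∨ c ∈ b.toList
    · exact h c hc
    · push_neg at hc
      rw [List.count_eq_zero_of_not_mem hc.1, List.count_eq_zero_of_not_mem hc.2]
  · intro h c _
    exact (List.perm_iff_count.mp h) c

-- each pair contributes the same verdict in both ports
theorem pv_pointwise (p : String × String) :
    (if (PySem.List.sorted (PySem.Str.lower p.1).toList (fun x => x) false ==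
         PySem.List.sorted (PySem.Str.lower p.2).toList (fun x => x) false)
     then ["YES"] else ["NO"]) =
    [if pvAnagram (PySem.Str.lower p.1) (PySem.Str.lower p.2) then "YES" else "NO"] := by
  by_cases h : (PySem.Str.lower p.1).toList.Perm (PySem.Str.lower p.2).toList
  · rw [if_pos, if_pos ((pvAnagram_iff_perm _ _).mpr h)]
    exact beq_iff_eq.mpr ((PySem.List.sorted_id_eq_sorted_id_iff_perm _ _).mpr h)
  · rw [if_neg, if_neg (fun hc => h ((pvAnagram_iff_perm _ _).mp hc))]
    intro hc
    exact h ((PySem.List.sorted_id_eq_sorted_id_iff_perm _ _).mp (beq_iff_eq.mp hc))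

-- ===== VERDICT (by name: the statement is the Claim_ definition above) =====
theorem swap_competition_spec : Claim_equal_swap_competition := by
  intro list_a hdom
  clear hdom
  unfold Spec_swap_competition swap_competition swap_competition_alt
  rw [PySem.List.foldl_pyRange_zero_pyGetD list_a ("", "")
      (fun result words =>
        if (PySem.List.sorted (PySem.Str.lower words.1).toList (fun x => x) false ==
            PySem.List.sorted (PySem.Str.lower words.2).toList (fun x => x) false)
        then result ++ ["YES"] else result ++ ["NO"]) []]
  induction list_a using List.reverseRecOn with
  | nil => rfl
  | append_singleton xs p ih =>
    rw [List.foldl_append, List.map_append, ← ih]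
    simp only [List.foldl_cons, List.foldl_nil, List.map_cons, List.map_nil]
    have hp := pv_pointwise p
    split_ifs at hp ⊢ <;> simp_all
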